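-- pv_equiv track=rewrite | github.com/AMD-AGI/TraceLens | TraceLens/AgenticMode/SemanticComparison/trace_comparison/align_semantic_blocks.py | _detect_layer_cycle
-- ===== SOURCE A (Python) =====
-- def _detect_layer_cycle(blocks):
--     """Extract one layer cycle from the block sequence.
--
--     Finds the repeating portion by looking for the first block with
--     layer=0 and then finding where layer=1 starts.
--     Returns (cycle_blocks, cycle_start_idx, cycle_end_idx).
--     """
--     first_layer0 = None
--     first_layer1 = None
--
--     for i, b in enumerate(blocks):
--         layer = b.get("layer")
--         if layer == 0 and first_layer0 is None:
--             first_layer0 = i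
--         elif layer == 1 and first_layer0 is not None and first_layer1 is None:
--             first_layer1 = i
--             break
--
--     if first_layer0 is not None and first_layer1 is not None:
--         return blocks[first_layer0:first_layer1], first_layer0, first_layer1
--     if first_layer0 is not None:
--         return blocks[first_layer0:], first_layer0, len(blocks)
--     return blocks, 0, len(blocks)
-- ===== SOURCE B (Python) =====
-- def _detect_layer_cycle(blocks):
--     """Build sorted occurrence-index lists for layer 0 and layer 1 once, then
--     pick the cycle bounds: the first 0-index, and (by binary search in the
--     sorted 1-index list) the first 1-index after it."""
--     layers = [b.get("layer") for b in blocks]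
--     zeros = [i for i, l in enumerate(layers) if l == 0]
--     ones = [i for i, l in enumerate(layers) if l == 1]
--     if not zeros:
--         return blocks, 0, len(blocks)
--     i0 = zeros[0]
--     lo, hi = 0, len(ones)
--     while lo < hi:  # binary search: first position in ones whose value exceeds i0
--         mid = (lo + hi) // 2
--         if ones[mid] <= i0:
--             lo = mid + 1
--         else:
--             hi = mid
--     i1 = ones[lo] if lo < len(ones) else len(blocks)
--     return blocks[i0:i1], i0, i1
-- ===== Notes on version B (the rewrite author's own statement) =====
-- stated objective: alternative
-- what changed: Replaces A's single stateful scan (two Optional flags updated in one loop with a break) by precomputing the sorted occurrence-index lists of layer-0 and layer-1 blocks and then choosing the bounds: head of the 0-list, and a binary search in the 1-list for the first index exceeding it.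
import Mathlib
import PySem

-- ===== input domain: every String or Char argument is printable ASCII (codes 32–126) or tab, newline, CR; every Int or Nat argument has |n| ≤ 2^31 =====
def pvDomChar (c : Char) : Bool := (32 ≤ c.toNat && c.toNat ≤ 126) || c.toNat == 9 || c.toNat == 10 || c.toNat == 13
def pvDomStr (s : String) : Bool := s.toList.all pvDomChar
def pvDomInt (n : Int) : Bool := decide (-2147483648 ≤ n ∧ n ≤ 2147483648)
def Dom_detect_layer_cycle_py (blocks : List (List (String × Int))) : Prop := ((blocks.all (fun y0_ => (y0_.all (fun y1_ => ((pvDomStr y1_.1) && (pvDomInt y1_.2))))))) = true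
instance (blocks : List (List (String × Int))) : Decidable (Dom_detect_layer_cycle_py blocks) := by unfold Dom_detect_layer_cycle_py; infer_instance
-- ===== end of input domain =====

-- B replaces A's single stateful scan (two Optional flags + break) with precomputed occurrence-index lists and a binary search; same cost, different structure. Return-value equivalence only (neither mutates its argument).


-- ===== PORT A =====
-- b.get("layer"): association-list lookup (first match), None ↦ none
def pvGetLayer (b : List (String × Int)) : Option Int :=
  (b.find? (fun p => p.1 == "layer")).map (·.2)

-- A's for-loop with enumerate, the two Optional flags and the early break, transliterated
def pvLoopA : List (List (String × Int)) → Nat → Option Nat → Option Nat → (Option Nat × Option Nat)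
  | [], _, f0, f1 => (f0, f1)
  | b :: rest, i, f0, f1 =>
    let layer := pvGetLayer b
    if layer == some 0 && f0.isNone then
      pvLoopA rest (i+1) (some i) f1
    else if layer == some 1 && f0.isSome && f1.isNone then
      (f0, some i)   -- break
    else
      pvLoopA rest (i+1) f0 f1

def detect_layer_cycle_py (blocks : List (List (String × Int))) : (List (List (String × Int))) × Int × Int :=
  match pvLoopA blocks 0 none none with
  | (some i0, some i1) =>
      (PySem.List.slice blocks (some (i0 : Int)) (some (i1 : Int)), (i0 : Int), (i1 : Int))
  | (some i0, none) =>
      (PySem.List.slice blocks (some (i0 : Int)) none, (i0 : Int), (blocks.length : Int))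
  | (none, _) => (blocks, 0, (blocks.length : Int))

-- ===== PORT B =====
-- 'while lo < hi' binary search of Source B; every call keeps lo < hi ≤ ones.length, so the
-- 'ones[mid]' indexing (mid < hi) is in range and getD is exact there
def pvBisect (ones : List Int) (i0 : Int) (lo hi : Nat) : Nat :=
  if lo < hi then
    let mid := (lo + hi) / 2
    if ones.getD mid 0 ≤ i0 then pvBisect ones i0 (mid + 1) hi
    else pvBisect ones i0 lo mid
  else lo
termination_by hi - lo
decreasing_by all_goals omega

def detect_layer_cycle_py_alt (blocks : List (List (String × Int))) : (List (List (String × Int))) × Int × Int :=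
  let layers := blocks.map pvGetLayer
  let zeros := (PySem.List.enumerate layers 0).filterMap (fun p => if p.2 == some 0 then some p.1 else none)
  let ones := (PySem.List.enumerate layers 0).filterMap (fun p => if p.2 == some 1 then some p.1 else none)
  match zeros with
  | [] => (blocks, 0, (blocks.length : Int))
  | i0 :: _ =>
    let lo := pvBisect ones i0 0 ones.length
    let i1 := if lo < ones.length then ones.getD lo 0 else (blocks.length : Int)
    (PySem.List.slice blocks (some i0) (some i1), i0, i1)

-- ===== PRECONDITION & SPEC =====
def Spec_detect_layer_cycle_py (blocks : List (List (String × Int))) (out : (List (List (String × Int))) × Int × Int) : Prop := out = detect_layer_cycle_py_alt blocks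
instance (blocks : List (List (String × Int))) (out : (List (List (String × Int))) × Int × Int) : Decidable (Spec_detect_layer_cycle_py blocks out) := by unfold Spec_detect_layer_cycle_py; infer_instance

-- ===== CLAIM (what is proved, stated in full; the proofs are below) =====
def Claim_equal_detect_layer_cycle_py : Prop := ∀ (blocks : List (List (String × Int))), Dom_detect_layer_cycle_py blocks → Spec_detect_layer_cycle_py blocks (detect_layer_cycle_py blocks)

-- ===== LEMMAS AND PROOFS =====

-- the comprehension '[i for i, l in enumerate(xs, s) if q l]' as a named function (proof-side)
def pvIdxs (q : Option Int → Bool) (xs : List (Option Int)) (s : Int) : List Int :=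
  (PySem.List.enumerate xs s).filterMap (fun p => if q p.2 then some p.1 else none)

theorem pvIdxs_cons (q : Option Int → Bool) (x : Option Int) (xs : List (Option Int)) (s : Int) :
    pvIdxs q (x :: xs) s = if q x then s :: pvIdxs q xs (s + 1) else pvIdxs q xs (s + 1) := by
  simp only [pvIdxs, PySem.List.enumerate_cons, List.filterMap_cons]
  by_cases h : q x <;> simp [h]

theorem pvIdxs_head? (q : Option Int → Bool) (xs : List (Option Int)) : ∀ (s : Int),
    (pvIdxs q xs s).head? = (xs.findIdx? q).map (fun k => s + (k : Int)) := by
  induction xs with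
  | nil => intro s; simp [pvIdxs, PySem.List.enumerate_nil]
  | cons x xs ih =>
    intro s
    rw [pvIdxs_cons]
    by_cases h : q x
    · simp [h, List.findIdx?_cons]
    · simp [h, List.findIdx?_cons, ih (s + 1)]
      cases xs.findIdx? q <;> simp
      omega

theorem pvIdxs_append (q : Option Int → Bool) (xs ys : List (Option Int)) (s : Int) :
    pvIdxs q (xs ++ ys) s = pvIdxs q xs s ++ pvIdxs q ys (s + xs.length) := by
  simp [pvIdxs, PySem.List.enumerate_append, List.filterMap_append]

theorem pvIdxs_bounds (q : Option Int → Bool) (xs : List (Option Int)) : ∀ (s : Int),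
    ∀ x ∈ pvIdxs q xs s, s ≤ x ∧ x < s + xs.length := by
  induction xs with
  | nil => intro s x hx; simp [pvIdxs, PySem.List.enumerate_nil] at hx
  | cons y xs ih =>
    intro s x hx
    rw [pvIdxs_cons] at hx
    have step : x ∈ pvIdxs q xs (s + 1) → s ≤ x ∧ x < s + (↑xs.length + 1) := by
      intro h; have := ih (s + 1) x h; constructor <;> omega
    by_cases h : q y
    · simp [h] at hx
      rcases hx with rfl | hx
      · simp
      · simpa using step hx
    · simp [h] at hx
      simpa using step hx

theorem pvBisect_eq (ones : List Int) (i0 : Int) (nL : Nat)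
    (hlow : ∀ k < nL, ones.getD k 0 ≤ i0)
    (hhigh : ∀ k, nL ≤ k → k < ones.length → i0 < ones.getD k 0) :
    ∀ (d lo hi : Nat), hi - lo ≤ d → lo ≤ nL → nL ≤ hi → hi ≤ ones.length →
      pvBisect ones i0 lo hi = nL := by
  intro d
  induction d with
  | zero =>
    intro lo hi hd h1 h2 h3
    rw [pvBisect]
    have : ¬ lo < hi := by omega
    simp [this]; omega
  | succ d ih =>
    intro lo hi hd h1 h2 h3
    rw [pvBisect]
    by_cases hlt : lo < hi
    · simp only [hlt, if_true]
      by_cases hm : ones.getD ((lo + hi) / 2) 0 ≤ i0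
      · simp only [hm, if_true]
        have hmidlt : (lo + hi) / 2 < nL := by
          by_contra hc
          have := hhigh ((lo + hi) / 2) (by omega) (by omega)
          omega
        exact ih ((lo + hi) / 2 + 1) hi (by omega) (by omega) h2 h3
      · simp only [hm, if_false]
        have hmidge : nL ≤ (lo + hi) / 2 := by
          by_contra hc
          exact hm (hlow _ (by omega))
        exact ih lo ((lo + hi) / 2) (by omega) h1 hmidge (by omega)
    · simp [hlt]; omega

-- A's loop after first_layer0 is set: only the layer==1 search remains
theorem pvLoopA_some (bs : List (List (String × Int))) (k : Nat) : ∀ (i : Nat),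
    pvLoopA bs i (some k) none
      = (some k, (bs.findIdx? (fun b => pvGetLayer b == some 1)).map (fun j => i + j)) := by
  induction bs with
  | nil => intro i; simp [pvLoopA]
  | cons b bs ih =>
    intro i
    by_cases h1 : pvGetLayer b == some 1
    · simp [pvLoopA, List.findIdx?_cons, h1]
    · have h1' : (pvGetLayer b == some 1) = false := by simpa using h1
      simp [pvLoopA, List.findIdx?_cons, h1', ih (i+1)]
      cases bs.findIdx? (fun b => pvGetLayer b == some 1) <;> (simp; try omega)

-- characterisation of A's whole loop by the two first-index searches
theorem pvLoopA_none (bs : List (List (String × Int))) : ∀ (i : Nat),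
    pvLoopA bs i none none
      = match bs.findIdx? (fun b => pvGetLayer b == some 0) with
        | none => (none, none)
        | some j => (some (i + j),
            ((bs.drop (j+1)).findIdx? (fun b => pvGetLayer b == some 1)).map
              (fun l => i + j + 1 + l)) := by
  induction bs with
  | nil => intro i; simp [pvLoopA]
  | cons b bs ih =>
    intro i
    by_cases h0 : pvGetLayer b == some 0
    · simp [pvLoopA, List.findIdx?_cons, h0, pvLoopA_some bs i (i+1)]
    · have h0' : (pvGetLayer b == some 0) = false := by simpa using h0
      simp [pvLoopA, List.findIdx?_cons, h0', ih (i+1)]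
      cases bs.findIdx? (fun b => pvGetLayer b == some 0) with
      | none => simp
      | some j =>
        simp
        constructor
        · omega
        · cases (bs.drop (j+1)).findIdx? (fun b => pvGetLayer b == some 1) <;> (simp; try omega)

-- ===== VERDICT (by name: the statement is the Claim_ definition above) =====
theorem detect_layer_cycle_py_spec : Claim_equal_detect_layer_cycle_py := by
  intro blocks _
  unfold Spec_detect_layer_cycle_py detect_layer_cycle_py detect_layer_cycle_py_alt
  rw [pvLoopA_none blocks 0]
  simp only [Nat.zero_add]
  -- the two comprehensions of B, named
  have hz : ((PySem.List.enumerate (blocks.map pvGetLayer) 0).filterMap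
      (fun p => if p.2 == some 0 then some p.1 else none))
      = pvIdxs (fun l => l == some 0) (blocks.map pvGetLayer) 0 := rfl
  have ho : ((PySem.List.enumerate (blocks.map pvGetLayer) 0).filterMap
      (fun p => if p.2 == some 1 then some p.1 else none))
      = pvIdxs (fun l => l == some 1) (blocks.map pvGetLayer) 0 := rfl
  rw [hz, ho]
  have hfz : (blocks.map pvGetLayer).findIdx? (fun l => l == some 0)
      = blocks.findIdx? (fun b => pvGetLayer b == some 0) := by
    rw [List.findIdx?_map]; rfl
  have hfo : ∀ n, ((blocks.map pvGetLayer).drop n).findIdx? (fun l => l == some 1)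
      = (blocks.drop n).findIdx? (fun b => pvGetLayer b == some 1) := by
    intro n; rw [← List.map_drop, List.findIdx?_map]; rfl
  cases h0 : blocks.findIdx? (fun b => pvGetLayer b == some 0) with
  | none =>
    have : (pvIdxs (fun l => l == some 0) (blocks.map pvGetLayer) 0) = [] := by
      have := pvIdxs_head? (fun l => l == some 0) (blocks.map pvGetLayer) 0
      rw [hfz, h0] at this
      simpa [List.head?_eq_none_iff] using this
    rw [this]
  | some j =>
    -- zeros = j :: rest
    have hhead : (pvIdxs (fun l => l == some 0) (blocks.map pvGetLayer) 0).head? = some (j : Int) := by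
      rw [pvIdxs_head?, hfz, h0]; simp
    obtain ⟨rest, hrest⟩ : ∃ rest, pvIdxs (fun l => l == some 0) (blocks.map pvGetLayer) 0 = (j : Int) :: rest := by
      cases hc : pvIdxs (fun l => l == some 0) (blocks.map pvGetLayer) 0 with
      | nil => rw [hc] at hhead; simp at hhead
      | cons a rest => rw [hc] at hhead; simp at hhead; exact ⟨rest, by rw [hhead]⟩
    rw [hrest]
    simp only
    have hjlt : j < blocks.length := by
      have := (List.findIdx?_eq_some_iff_getElem.mp h0).1
      exact this
    -- split ones at position j+1
    have hlen : ((blocks.map pvGetLayer).take (j+1)).length = j + 1 := by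
      simp; omega
    set L := pvIdxs (fun l => l == some 1) ((blocks.map pvGetLayer).take (j+1)) 0 with hL
    set R := pvIdxs (fun l => l == some 1) ((blocks.map pvGetLayer).drop (j+1)) (0 + ((blocks.map pvGetLayer).take (j+1)).length) with hR
    have hsplit : pvIdxs (fun l => l == some 1) (blocks.map pvGetLayer) 0 = L ++ R := by
      conv_lhs => rw [← List.take_append_drop (j+1) (blocks.map pvGetLayer)]
      rw [pvIdxs_append]
    rw [hsplit]
    have hLb : ∀ x ∈ L, 0 ≤ x ∧ x ≤ (j : Int) := by
      intro x hx
      have := pvIdxs_bounds (fun l => l == some 1) ((blocks.map pvGetLayer).take (j+1)) 0 x hx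
      rw [hlen] at this
      push_cast at this ⊢
      omega
    have hRb : ∀ x ∈ R, (j : Int) < x := by
      intro x hx
      have := pvIdxs_bounds (fun l => l == some 1) ((blocks.map pvGetLayer).drop (j+1)) _ x hx
      rw [hlen] at this
      push_cast at this
      omega
    have hbis : pvBisect (L ++ R) (j : Int) 0 (L ++ R).length = L.length := by
      apply pvBisect_eq (L ++ R) (j : Int) L.length _ _ (L ++ R).length 0 (L ++ R).length
        (by omega) (by omega) (by simp) (le_refl _)
      · intro k hk
        rw [List.getD_append _ _ _ _ hk]
        have : L.getD k 0 ∈ L := by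
          rw [List.getD_eq_getElem _ _ hk]; exact List.getElem_mem hk
        exact (hLb _ this).2
      · intro k hk1 hk2
        rw [List.getD_append_right _ _ _ _ hk1]
        have hk3 : k - L.length < R.length := by simp at hk2; omega
        have : R.getD (k - L.length) 0 ∈ R := by
          rw [List.getD_eq_getElem _ _ hk3]; exact List.getElem_mem hk3
        exact hRb _ this
    rw [hbis]
    -- the layer-1 search after j, on both sides
    have hRhead : R.head? = ((blocks.drop (j+1)).findIdx? (fun b => pvGetLayer b == some 1)).map
        (fun l => (0 + ((blocks.map pvGetLayer).take (j+1)).length : Int) + l) := by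
      rw [hR, pvIdxs_head?, hfo]
    cases h1 : (blocks.drop (j+1)).findIdx? (fun b => pvGetLayer b == some 1) with
    | none =>
      have hRnil : R = [] := by
        rw [h1] at hRhead; simpa [List.head?_eq_none_iff] using hRhead
      have hcond : ¬ L.length < (L ++ R).length := by simp [hRnil]
      simp only [hcond, if_false, Option.map_none]
      simp only [Prod.mk.injEq]
      refine ⟨?_, trivial⟩
      rw [PySem.List.slice_natCast, PySem.List.slice_from_natCast]
      exact (List.take_of_length_le (by simp)).symm
    | some l =>
      have hRcons : ∃ t, R = ((j : Int) + 1 + (l : Int)) :: t := by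
        rw [h1] at hRhead
        cases hc : R with
        | nil => rw [hc] at hRhead; simp at hRhead
        | cons a t =>
          rw [hc] at hRhead
          simp at hRhead
          refine ⟨t, ?_⟩
          have ha : a = (j : Int) + 1 + (l : Int) := by omega
          rw [ha]
      obtain ⟨t, ht⟩ := hRcons
      have hcond : L.length < (L ++ R).length := by simp [ht]
      simp only [hcond, if_true, Option.map_some]
      have hget : (L ++ R).getD L.length 0 = (j : Int) + 1 + (l : Int) := by
        rw [List.getD_append_right _ _ _ _ (le_refl _)]
        simp [ht]
      have hcast : ((j + 1 + l : Nat) : Int) = (j : Int) + 1 + (l : Int) := by push_cast; ring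
      rw [hget, ← hcast]
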